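-- pv_equiv track=rewrite | github.com/rlawnsh/Algorithm_Study | 숫자게임.py | solution
-- ===== SOURCE A (Python) =====
-- from collections import deque
--
-- def solution(A, B):
--     A.sort(reverse=True)
--     B.sort(reverse=True)
--     B = deque(B)
--     answer = 0
--
--     for i in range(len(A)):
--         if A[i] < B[i]:
--             answer += 1
--         else:
--             B.appendleft(B.pop())
--     return answer
-- ===== SOURCE B (Python) =====
-- def solution(A, B):
--     # Greedy two-pointer scan over the descending-sorted lists (no deque, no rotation).
--     # Note: the original sorts A and B in place; this version leaves the arguments untouched.
--     As = sorted(A, reverse=True)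
--     Bs = sorted(B, reverse=True)
--     j = 0
--     for a in As:
--         if j < len(Bs) and a < Bs[j]:
--             j += 1
--     return j
-- ===== Notes on version B (the rewrite author's own statement) =====
-- stated objective: faster
-- what changed: The deque with appendleft(pop()) rotations and O(k) positional deque indexing is replaced by a plain two-pointer scan of the sorted lists: a single pointer into sorted B advances only on a win, so the loop body is O(1).
import Mathlib
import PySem

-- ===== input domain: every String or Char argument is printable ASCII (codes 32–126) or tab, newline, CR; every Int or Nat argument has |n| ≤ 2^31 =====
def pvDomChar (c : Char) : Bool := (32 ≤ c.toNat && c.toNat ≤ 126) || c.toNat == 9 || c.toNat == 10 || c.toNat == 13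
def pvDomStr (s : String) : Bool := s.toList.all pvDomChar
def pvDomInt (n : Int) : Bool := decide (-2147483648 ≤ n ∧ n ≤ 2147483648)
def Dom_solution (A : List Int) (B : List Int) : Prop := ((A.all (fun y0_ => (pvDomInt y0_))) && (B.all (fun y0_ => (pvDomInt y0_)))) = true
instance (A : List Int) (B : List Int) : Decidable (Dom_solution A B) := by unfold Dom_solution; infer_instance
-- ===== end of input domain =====

-- B replaces A's deque rotations and positional deque indexing by a plain two-pointer scan
-- of the sorted lists (objective: faster). A sorts its arguments in place; B does not —
-- the equivalence proved here is about the RETURN value only.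

-- ===== PORT A =====
-- B.appendleft(B.pop()): move the last element to the front (Python raises on an empty
-- deque; that input is excluded by Pre_, the `none` branch returns the deque unchanged).
def pvRot (d : List Int) : List Int :=
  match d.getLast? with
  | none => d
  | some x => x :: d.dropLast

-- the `for i in range(len(A))` loop: `as` is the remaining suffix of sorted A, `i` the
-- current index, `d` the deque, `ans` the counter; `none` = Python's IndexError (outside Pre_).
def pvLoopA (d : List Int) (i : Nat) (as : List Int) (ans : Int) : Int :=
  match as with
  | [] => ans
  | a :: rest =>
    match PySem.List.pyGet? d (i : Int) with
    | none => ans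
    | some b =>
      if a < b then pvLoopA d (i + 1) rest (ans + 1)
      else pvLoopA (pvRot d) (i + 1) rest ans

def solution (A : List Int) (B : List Int) : Int :=
  pvLoopA (PySem.List.sorted B (fun x => x) true) 0 (PySem.List.sorted A (fun x => x) true) 0

-- ===== PORT B =====
def solution_alt (A : List Int) (B : List Int) : Int :=
  let As := PySem.List.sorted A (fun x => x) true
  let Bs := PySem.List.sorted B (fun x => x) true
  ((As.foldl (fun j a => if j < Bs.length ∧ a < Bs.getD j 0 then j + 1 else j) 0 : Nat) : Int)

-- ===== PRECONDITION & SPEC =====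
-- Pre_ excludes exactly the inputs where A raises IndexError (B[i] with i ≥ len(B)).
def Pre_solution (A : List Int) (B : List Int) : Prop := A.length ≤ B.length
instance (A : List Int) (B : List Int) : Decidable (Pre_solution A B) := by unfold Pre_solution; infer_instance
def pvWitness_solution : List Int × List Int := ([3, 1], [2, 4])

def Spec_solution (A : List Int) (B : List Int) (out : Int) : Prop := out = solution_alt A B
instance (A : List Int) (B : List Int) (out : Int) : Decidable (Spec_solution A B out) := by unfold Spec_solution; infer_instance

-- ===== CLAIM (what is proved, stated in full; the proofs are below) =====
def Claim_equal_solution : Prop := ∀ (A : List Int) (B : List Int), Dom_solution A B → Pre_solution A B → Spec_solution A B (solution A B)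

-- ===== LEMMAS AND PROOFS =====
-- Invariant: after r rotations the deque agrees with sorted B shifted by r on indices ≥ r,
-- and A's counter equals B's pointer j (the index i is always j + r).
theorem pvLoop_eq (Bs : List Int) (as : List Int) : ∀ (d : List Int) (j r : Nat),
    d.length = Bs.length →
    j + r + as.length ≤ Bs.length →
    (∀ k, r ≤ k → k < Bs.length → d[k]? = Bs[k - r]?) →
    pvLoopA d (j + r) as (j : Int) =
      ((as.foldl (fun j a => if j < Bs.length ∧ a < Bs.getD j 0 then j + 1 else j) j : Nat) : Int) := by
  induction as with
  | nil => intro d j r _ _ _; simp [pvLoopA]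
  | cons a rest ih =>
    intro d j r hlen hle hinv
    have hjr : j + r < Bs.length := by simp at hle; omega
    have hj : j < Bs.length := by omega
    have hget : d[(j + r)]? = some Bs[j] := by
      rw [hinv (j + r) (by omega) hjr]
      simp
    have hd : PySem.List.pyGet? d ((j + r : Nat) : Int) = some Bs[j] := by
      rw [PySem.List.pyGet?_natCast]; exact hget
    have hgetD : Bs.getD j 0 = Bs[j] := List.getD_eq_getElem Bs 0 hj
    simp only [pvLoopA, hd, List.foldl_cons]
    by_cases hc : a < Bs[j]
    · rw [if_pos hc, if_pos ⟨hj, hgetD ▸ hc⟩]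
      have : ((j : Int) + 1) = ((j + 1 : Nat) : Int) := by push_cast; ring
      rw [this]
      have := ih d (j + 1) r hlen (by simp at hle ⊢; omega) hinv
      rw [show j + 1 + r = (j + r) + 1 by omega] at this
      exact this
    · rw [if_neg hc, if_neg (by rw [hgetD]; exact fun h => hc h.2)]
      have hdne : d ≠ [] := by
        intro h; rw [h] at hlen; simp at hlen; omega
      have hrot : pvRot d = d.getLast hdne :: d.dropLast := by
        simp [pvRot, List.getLast?_eq_getLast_of_ne_nil hdne]
      have hlen' : (pvRot d).length = Bs.length := by
        rw [hrot]; simp [List.length_dropLast]; omega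
      have hinv' : ∀ k, r + 1 ≤ k → k < Bs.length → (pvRot d)[k]? = Bs[k - (r + 1)]? := by
        intro k hk1 hk2
        rw [hrot]
        have hk0 : k ≠ 0 := by omega
        obtain ⟨k', rfl⟩ : ∃ k', k = k' + 1 := ⟨k - 1, by omega⟩
        rw [List.getElem?_cons_succ]
        have hk'lt : k' < d.dropLast.length := by
          rw [List.length_dropLast, hlen]; omega
        rw [List.getElem?_eq_getElem hk'lt, List.getElem_dropLast]
        have : d[k']? = Bs[k' - r]? := by
          apply hinv k' (by omega) (by omega)
        rw [List.getElem?_eq_getElem (by omega : k' < d.length)] at this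
        rw [show k' + 1 - (r + 1) = k' - r by omega, ← this]
      have := ih (pvRot d) j (r + 1) hlen' (by simp at hle ⊢; omega) hinv'
      rw [show j + (r + 1) = (j + r) + 1 by omega] at this
      exact this

theorem solution_spec : Claim_equal_solution := by
  intro A B _ hpre
  unfold Spec_solution solution solution_alt
  have hlenB : (PySem.List.sorted B (fun x => x) true).length = B.length := PySem.List.length_sorted ..
  have hlenA : (PySem.List.sorted A (fun x => x) true).length = A.length := PySem.List.length_sorted ..
  have := pvLoop_eq (PySem.List.sorted B (fun x => x) true) (PySem.List.sorted A (fun x => x) true)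
    (PySem.List.sorted B (fun x => x) true) 0 0 rfl (by simp [hlenA, hlenB]; exact hpre)
    (fun k _ _ => by simp)
  simpa using this
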